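-- pv_equiv track=rewrite | github.com/mateiana13/Analiza-Discursului-Politic-Pe-Retele-De-Socializare | results.py | countTrueFalse
-- ===== SOURCE A (Python) =====
-- def countTrueFalse(res_politician):
-- 	true=0
-- 	false=0
-- 	for res in res_politician:
-- 		if res == 1:
-- 			true = true + 1
-- 		else:
-- 			false = false + 1
-- 	res=[true,false]
-- 	return res
-- ===== SOURCE B (Python) =====
-- def _dc(xs):
-- 	n = len(xs)
-- 	if n == 0:
-- 		return (0, 0)
-- 	if n == 1:
-- 		return (1, 0) if xs[0] == 1 else (0, 1)
-- 	m = n // 2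
-- 	t1, f1 = _dc(xs[:m])
-- 	t2, f2 = _dc(xs[m:])
-- 	return (t1 + t2, f1 + f2)
--
-- def countTrueFalse(res_politician):
-- 	t, f = _dc(res_politician)
-- 	return [t, f]
-- ===== Notes on version B (the rewrite author's own statement) =====
-- stated objective: alternative
-- what changed: B replaces A's single linear pass with two symmetric counters by a divide-and-conquer recursion: split the list in halves, count each half recursively, and add the two pairs.
import Mathlib
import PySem

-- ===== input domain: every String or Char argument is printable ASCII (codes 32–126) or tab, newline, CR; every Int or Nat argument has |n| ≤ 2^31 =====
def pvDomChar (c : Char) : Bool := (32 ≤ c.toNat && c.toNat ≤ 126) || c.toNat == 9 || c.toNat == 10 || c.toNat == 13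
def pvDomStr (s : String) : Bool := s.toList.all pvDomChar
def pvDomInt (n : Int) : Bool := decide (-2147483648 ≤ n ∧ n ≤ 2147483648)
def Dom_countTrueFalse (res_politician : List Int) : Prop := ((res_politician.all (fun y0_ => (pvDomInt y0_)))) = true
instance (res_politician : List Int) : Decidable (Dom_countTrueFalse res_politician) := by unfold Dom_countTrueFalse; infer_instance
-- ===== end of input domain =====

-- B replaces A's single linear pass (two counters, per-element branch) by a divide-and-conquer
-- recursion that counts each half and adds the pairs (alternative decomposition, same result).

-- ===== PORT A =====
-- literal port of A's loop: fold over the list carrying the pair of counters (true, false)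
def countTrueFalse (res_politician : List Int) : List Int :=
  let p := res_politician.foldl
    (fun (acc : Int × Int) res =>
      if res == 1 then (acc.1 + 1, acc.2) else (acc.1, acc.2 + 1))
    (0, 0)
  [p.1, p.2]

-- ===== PORT B =====
-- _dc from Source B: the n=0 / n=1 / split cases; xs[:m], xs[m:] with 0 ≤ m ≤ len(xs) are exactly take/drop
def pvDC : List Int → Int × Int
  | [] => (0, 0)
  | [x] => if x == 1 then (1, 0) else (0, 1)
  | x :: y :: rest =>
      let xs := x :: y :: rest
      let m := xs.length / 2
      let p := pvDC (xs.take m)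
      let q := pvDC (xs.drop m)
      (p.1 + q.1, p.2 + q.2)
termination_by xs => xs.length
decreasing_by
  · simp only [List.length_take, List.length_cons]; omega
  · simp only [List.length_drop, List.length_cons]; omega

def countTrueFalse_alt (res_politician : List Int) : List Int :=
  let p := pvDC res_politician
  [p.1, p.2]

-- ===== PRECONDITION & SPEC =====
def Spec_countTrueFalse (res_politician : List Int) (out : List Int) : Prop := out = countTrueFalse_alt res_politician
instance (res_politician : List Int) (out : List Int) : Decidable (Spec_countTrueFalse res_politician out) := by unfold Spec_countTrueFalse; infer_instance

-- ===== CLAIM (what is proved, stated in full; the proofs are below) =====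
def Claim_equal_countTrueFalse : Prop := ∀ (res_politician : List Int), Dom_countTrueFalse res_politician → Spec_countTrueFalse res_politician (countTrueFalse res_politician)

-- ===== LEMMAS AND PROOFS =====
-- Both sides equal (count of 1s, length - count of 1s).
theorem countTrueFalse_fold (xs : List Int) (a b : Int) :
    xs.foldl (fun (acc : Int × Int) res =>
      if res == 1 then (acc.1 + 1, acc.2) else (acc.1, acc.2 + 1)) (a, b)
    = (a + (xs.count 1 : Int), b + ((xs.length : Int) - (xs.count 1 : Int))) := by
  induction xs generalizing a b with
  | nil => simp
  | cons x xs ih =>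
    simp only [List.foldl]
    by_cases h : x = 1
    · subst h
      simp only [beq_self_eq_true, if_pos trivial, ih, List.count_cons, Prod.mk.injEq,
        List.length_cons]
      refine ⟨by push_cast; ring, by push_cast; ring⟩
    · rw [if_neg (by simpa using h)]
      simp only [ih, List.count_cons, Prod.mk.injEq, List.length_cons]
      rw [if_neg (by simpa using h)]
      refine ⟨by push_cast; ring, by push_cast; ring⟩

theorem pvDC_eq_aux (n : Nat) : ∀ (xs : List Int), xs.length ≤ n →
    pvDC xs = ((xs.count 1 : Int), (xs.length : Int) - (xs.count 1 : Int)) := by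
  induction n with
  | zero =>
    intro xs h
    have hx : xs = [] := by cases xs <;> simp_all
    subst hx; simp [pvDC]
  | succ n ih =>
    intro xs h
    match xs with
    | [] => simp [pvDC]
    | [x] =>
      by_cases hx : (x == 1) = true
      · rw [pvDC, if_pos hx]; simp [List.count_cons, hx]
      · rw [pvDC, if_neg hx]
        simp only [List.count_cons, List.count_nil, List.length_cons, List.length_nil]
        rw [if_neg (by simp at hx ⊢; omega)]
        simp
    | x :: y :: rest =>
      rw [pvDC]
      show ((pvDC ((x :: y :: rest).take ((x :: y :: rest).length / 2))).1 +
            (pvDC ((x :: y :: rest).drop ((x :: y :: rest).length / 2))).1,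
            (pvDC ((x :: y :: rest).take ((x :: y :: rest).length / 2))).2 +
            (pvDC ((x :: y :: rest).drop ((x :: y :: rest).length / 2))).2) = _
      rw [ih _ (by simp only [List.length_take, List.length_cons] at *; omega),
          ih _ (by simp only [List.length_drop, List.length_cons] at *; omega)]
      have h1 : (x :: y :: rest).take ((x :: y :: rest).length / 2) ++
          (x :: y :: rest).drop ((x :: y :: rest).length / 2) = x :: y :: rest :=
        List.take_append_drop _ _
      have hc : ((x :: y :: rest).take ((x :: y :: rest).length / 2)).count 1 +
          ((x :: y :: rest).drop ((x :: y :: rest).length / 2)).count 1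
          = (x :: y :: rest).count 1 := by
        rw [← List.count_append, h1]
      have hl : ((x :: y :: rest).take ((x :: y :: rest).length / 2)).length +
          ((x :: y :: rest).drop ((x :: y :: rest).length / 2)).length
          = (x :: y :: rest).length := by
        rw [← List.length_append, h1]
      simp only [Prod.mk.injEq]
      exact ⟨by omega, by omega⟩

theorem pvDC_eq (xs : List Int) :
    pvDC xs = ((xs.count 1 : Int), (xs.length : Int) - (xs.count 1 : Int)) :=
  pvDC_eq_aux xs.length xs le_rfl

-- ===== VERDICT (by name: the statement is the Claim_ definition above) =====
theorem countTrueFalse_spec : Claim_equal_countTrueFalse := by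
  intro xs _
  unfold Spec_countTrueFalse countTrueFalse countTrueFalse_alt
  rw [countTrueFalse_fold, pvDC_eq]
  simp
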